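-- pv_equiv track=rewrite | github.com/BenSej/EmailClassifier | naive_bayes.py | create_word_maps_uni
-- ===== SOURCE A (Python) =====
-- from collections import Counter
-- from collections import Counter
--
-- def create_word_maps_uni(X, y, max_size=None):
--     """
--     X: train sets
--     y: train labels
--     max_size: you can ignore this, we are not using it
--
--     return two dictionaries: pos_vocab, neg_vocab
--     pos_vocab:
--         In data where labels are 1
--         keys: words
--         values: number of times the word appears
--     neg_vocab:
--         In data where labels are 0
--         keys: words
--         values: number of times the word appears
--     """
--
--     pos_vocab = {}
--     neg_vocab = {}
--     for i in range(0, len(X)):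
--         counter = Counter(X[i])
--         if y[i] == 1:
--             for word in counter:
--                 pos_vocab[word] = counter.get(word) + pos_vocab.get(word, 0)
--         else:
--             for word in counter:
--                 neg_vocab[word] = counter.get(word) + neg_vocab.get(word, 0)
--
--     return dict(pos_vocab), dict(neg_vocab)
-- ===== SOURCE B (Python) =====
-- from collections import Counter
--
--
-- def create_word_maps_uni(X, y, max_size=None):
--     pairs = list(zip(X, y))
--     pos_words = [w for doc, label in pairs if label == 1 for w in doc]
--     neg_words = [w for doc, label in pairs if label != 1 for w in doc]
--     return dict(Counter(pos_words)), dict(Counter(neg_words))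
-- ===== Notes on version B (the rewrite author's own statement) =====
-- stated objective: simpler
-- what changed: B replaces A's index loop with a per-document Counter merged entry-by-entry into the vocab dicts by one zip-partition of the documents into positive/negative word streams followed by a single flat Counter per class.
import Mathlib
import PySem

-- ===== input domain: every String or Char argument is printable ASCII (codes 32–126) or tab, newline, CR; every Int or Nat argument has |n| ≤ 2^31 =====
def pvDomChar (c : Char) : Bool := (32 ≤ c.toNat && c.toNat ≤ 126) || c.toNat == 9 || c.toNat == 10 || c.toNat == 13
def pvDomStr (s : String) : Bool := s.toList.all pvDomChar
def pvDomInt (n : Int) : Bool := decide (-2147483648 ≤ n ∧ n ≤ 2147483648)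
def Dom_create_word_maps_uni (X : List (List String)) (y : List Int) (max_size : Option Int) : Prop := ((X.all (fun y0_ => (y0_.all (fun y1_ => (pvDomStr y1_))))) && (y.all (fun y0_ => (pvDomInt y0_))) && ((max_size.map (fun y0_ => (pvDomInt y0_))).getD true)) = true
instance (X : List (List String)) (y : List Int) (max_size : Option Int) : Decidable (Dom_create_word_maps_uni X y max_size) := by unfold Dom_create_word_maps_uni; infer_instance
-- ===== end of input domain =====

-- B partitions the zipped (doc, label) pairs into the two classes' word streams and counts
-- each stream with a single flat Counter, instead of A's index loop that merges a per-document
-- Counter into the vocab dicts; objective: simpler.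

-- ===== PORT A =====
-- `for word in counter: vocab[word] = counter.get(word) + vocab.get(word, 0)`
-- (counter.get(word) is the count: word is always a key of the counter, so `.getD w 0` is exact)
def pvMergeCounter (c : PySem.Dict String Int) (vocab : PySem.Dict String Int) : PySem.Dict String Int :=
  c.keys.foldl (fun v w => v.insert w (c.getD w 0 + v.getD w 0)) vocab

-- one iteration of A's `for i in range(0, len(X))` loop; `none` = the IndexError state
def pvStepA (X : List (List String)) (y : List Int)
    (st : Option (PySem.Dict String Int × PySem.Dict String Int)) (i : Int) :
    Option (PySem.Dict String Int × PySem.Dict String Int) :=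
  match st with
  | none => none
  | some (pos, neg) =>
    match PySem.List.pyGet? X i, PySem.List.pyGet? y i with
    | some xi, some yi =>
      let counter := PySem.Dict.counter xi
      if yi = 1 then some (pvMergeCounter counter pos, neg)
      else some (pos, pvMergeCounter counter neg)
    | _, _ => none

def create_word_maps_uni (X : List (List String)) (y : List Int) (max_size : Option Int) :
    (List (String × Int)) × (List (String × Int)) :=
  let r := (PySem.List.pyRange 0 (X.length : Int) 1).foldl (pvStepA X y)
    (some (PySem.Dict.empty, PySem.Dict.empty))
  match r with
  | some (pos, neg) => (pos.items, neg.items)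
  | none => ([], [])  -- unreachable under Pre_ (Python raises IndexError)

-- ===== PORT B =====
def create_word_maps_uni_alt (X : List (List String)) (y : List Int) (max_size : Option Int) :
    (List (String × Int)) × (List (String × Int)) :=
  let pairs := X.zip y
  let pos_words := (pairs.filter (fun p => p.2 == 1)).flatMap (fun p => p.1)
  let neg_words := (pairs.filter (fun p => p.2 != 1)).flatMap (fun p => p.1)
  ((PySem.Dict.counter pos_words).items, (PySem.Dict.counter neg_words).items)

-- ===== PRECONDITION & SPEC =====
-- A reads y[i] for every i < len(X): it raises IndexError unless len(X) ≤ len(y)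
def Pre_create_word_maps_uni (X : List (List String)) (y : List Int) (max_size : Option Int) : Prop :=
  X.length ≤ y.length
instance (X : List (List String)) (y : List Int) (max_size : Option Int) : Decidable (Pre_create_word_maps_uni X y max_size) := by unfold Pre_create_word_maps_uni; infer_instance

def pvWitness_create_word_maps_uni : List (List String) × List Int × Option Int :=
  ([["a", "b", "a"], ["b"], ["a"]], [1, 0, 1], none)

def Spec_create_word_maps_uni (X : List (List String)) (y : List Int) (max_size : Option Int) (out : (List (String × Int)) × (List (String × Int))) : Prop := out = create_word_maps_uni_alt X y max_size
instance (X : List (List String)) (y : List Int) (max_size : Option Int) (out : (List (String × Int)) × (List (String × Int))) : Decidable (Spec_create_word_maps_uni X y max_size out) := by unfold Spec_create_word_maps_uni; infer_instance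

-- ===== CLAIM (what is proved, stated in full; the proofs are below) =====
def Claim_equal_create_word_maps_uni : Prop := ∀ (X : List (List String)) (y : List Int) (max_size : Option Int), Dom_create_word_maps_uni X y max_size → Pre_create_word_maps_uni X y max_size → Spec_create_word_maps_uni X y max_size (create_word_maps_uni X y max_size)


-- ===== LEMMAS AND PROOFS =====

-- B's elementary counting step (what `Counter` does per word); proof-side only
def pvBump (d : PySem.Dict String Int) (w : String) : PySem.Dict String Int :=
  d.insert w (d.getD w 0 + 1)

-- the per-pair step A's loop performs on the (pos, neg) state; proof-side only
def pvPairStep (st : PySem.Dict String Int × PySem.Dict String Int) (p : List String × Int) :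
    PySem.Dict String Int × PySem.Dict String Int :=
  if p.2 = 1 then (pvMergeCounter (PySem.Dict.counter p.1) st.1, st.2)
  else (st.1, pvMergeCounter (PySem.Dict.counter p.1) st.2)

lemma pvGetD_foldl_insert_val (ks : List String) (val : String → Int) :
    ∀ (v : PySem.Dict String Int) (x : String), ks.Nodup →
    (ks.foldl (fun v w => v.insert w (val w + v.getD w 0)) v).getD x 0 =
      if x ∈ ks then val x + v.getD x 0 else v.getD x 0 := by
  induction ks with
  | nil => intro v x _; simp
  | cons k ks ih =>
    intro v x hnd
    rcases List.nodup_cons.mp hnd with ⟨hk, hnd'⟩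
    simp only [List.foldl_cons]
    rw [ih _ x hnd']
    by_cases hx : x = k
    · subst hx
      simp [hk]
    · simp [PySem.Dict.getD_insert, hx]

lemma pvGetD_mergeCounter (xi : List String) (v : PySem.Dict String Int) (x : String) :
    (pvMergeCounter (PySem.Dict.counter xi) v).getD x 0 = v.getD x 0 + xi.count x := by
  unfold pvMergeCounter
  rw [pvGetD_foldl_insert_val _ _ _ _ (PySem.Dict.nodup_keys_counter xi)]
  rw [PySem.Dict.keys_counter]
  by_cases hx : x ∈ xi
  · simp [PySem.Set.mem_ofList, hx, PySem.Dict.getD_counter]; ring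
  · simp [PySem.Set.mem_ofList, hx, List.count_eq_zero_of_not_mem hx]

lemma pvMergeCounter_eq_bump (xi : List String) (v : PySem.Dict String Int)
    (hv : v.keys.Nodup) : pvMergeCounter (PySem.Dict.counter xi) v = xi.foldl pvBump v := by
  have hnd1 : (pvMergeCounter (PySem.Dict.counter xi) v).keys.Nodup :=
    PySem.Dict.nodup_keys_foldl_insert _ _ _ hv
  have hnd2 : (xi.foldl pvBump v).keys.Nodup := by
    unfold pvBump; exact PySem.Dict.nodup_keys_foldl_insert _ _ _ hv
  have hkeys : (pvMergeCounter (PySem.Dict.counter xi) v).keys = (xi.foldl pvBump v).keys := by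
    unfold pvMergeCounter pvBump
    rw [PySem.Dict.keys_foldl_insert, PySem.Dict.keys_foldl_insert, PySem.Dict.keys_counter]
    rw [PySem.Set.update_eq_append_filter, PySem.Set.update_eq_append_filter,
      PySem.Set.ofList_ofList]
  apply PySem.Dict.ext
  rw [PySem.Dict.items_eq_map_keys _ hnd1 0, PySem.Dict.items_eq_map_keys _ hnd2 0, hkeys]
  apply List.map_congr_left
  intro k _
  rw [pvGetD_mergeCounter]
  unfold pvBump
  rw [PySem.Dict.getD_foldl_insert_add_one]

lemma pvFoldPairs_closed (l : List (List String × Int)) :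
    ∀ (p n : PySem.Dict String Int), p.keys.Nodup → n.keys.Nodup →
    l.foldl pvPairStep (p, n) =
      (((l.filter (fun q => q.2 == 1)).flatMap (fun q => q.1)).foldl pvBump p,
       ((l.filter (fun q => q.2 != 1)).flatMap (fun q => q.1)).foldl pvBump n) := by
  induction l with
  | nil => intro p n _ _; simp
  | cons q l ih =>
    intro p n hp hn
    obtain ⟨xi, yi⟩ := q
    by_cases hy : yi = 1
    · simp only [List.foldl_cons, pvPairStep, hy, if_true, List.filter_cons]
      rw [pvMergeCounter_eq_bump _ _ hp]
      rw [ih _ _ (by unfold pvBump; exact PySem.Dict.nodup_keys_foldl_insert _ _ _ hp) hn]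
      simp [List.foldl_append]
    · have h1 : ((xi, yi).2 == (1 : Int)) = false := by simp [hy]
      have h2 : ((xi, yi).2 != (1 : Int)) = true := by simp [hy]
      simp only [List.foldl_cons, pvPairStep, hy, if_false, List.filter_cons, h1, h2]
      rw [pvMergeCounter_eq_bump _ _ hn]
      rw [ih _ _ hp (by unfold pvBump; exact PySem.Dict.nodup_keys_foldl_insert _ _ _ hn)]
      simp [List.foldl_append]

lemma pvLoopA (X : List (List String)) (y : List Int) (hlen : X.length ≤ y.length) :
    ∀ (m k : Nat) (st : PySem.Dict String Int × PySem.Dict String Int), X.length - k = m →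
    (PySem.List.pyRange (k : Int) (X.length : Int) 1).foldl (pvStepA X y) (some st) =
      some (((X.drop k).zip (y.drop k)).foldl pvPairStep st) := by
  intro m
  induction m with
  | zero =>
    intro k st hm
    have hk : X.length ≤ k := by omega
    rw [PySem.List.pyRange_one_eq_nil (by exact_mod_cast hk)]
    rw [List.drop_eq_nil_of_le hk]
    simp
  | succ m ih =>
    intro k st hm
    have hk : k < X.length := by omega
    have hky : k < y.length := by omega
    rw [PySem.List.pyRange_one_cons (by exact_mod_cast hk)]
    simp only [List.foldl_cons]
    have hx : PySem.List.pyGet? X (k : Int) = some X[k] := by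
      rw [PySem.List.pyGet?_natCast]; simp [hk]
    have hy2 : PySem.List.pyGet? y (k : Int) = some y[k] := by
      rw [PySem.List.pyGet?_natCast]; simp [hky]
    have hstep : pvStepA X y (some st) (k : Int) = some (pvPairStep st (X[k], y[k])) := by
      obtain ⟨p, n⟩ := st
      simp only [pvStepA, hx, hy2, pvPairStep]
      by_cases h1 : y[k] = 1 <;> simp [h1]
    rw [hstep]
    have hcast : ((k : Int) + 1) = ((k + 1 : Nat) : Int) := by push_cast; ring
    rw [hcast, ih (k + 1) _ (by omega)]
    rw [List.drop_eq_getElem_cons hk, List.drop_eq_getElem_cons hky, List.zip_cons_cons,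
      List.foldl_cons]

-- ===== VERDICT (by name: the statement is the Claim_ definition above) =====
theorem create_word_maps_uni_spec : Claim_equal_create_word_maps_uni := by
  intro X y max_size _ hPre
  unfold Spec_create_word_maps_uni create_word_maps_uni create_word_maps_uni_alt
  have h0 : ((0 : Int)) = ((0 : Nat) : Int) := by norm_num
  rw [h0, pvLoopA X y hPre (X.length - 0) 0 _ rfl]
  simp only [List.drop_zero]
  rw [pvFoldPairs_closed _ _ _ PySem.Dict.nodup_keys_empty PySem.Dict.nodup_keys_empty]
  have hc : ∀ (ws : List String),
      ws.foldl pvBump PySem.Dict.empty = PySem.Dict.counter ws := by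
    intro ws
    unfold pvBump
    exact PySem.Dict.foldl_insert_getD_add_one_eq_counter ws
  rw [hc, hc]
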